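-- pv_equiv track=rewrite | github.com/ValerieMauduit/AoC2024 | all_days/day08.py | get_all_antinodes
-- ===== SOURCE A (Python) =====
-- def get_antenna_positions(data, symbol):
--     positions = []
--     for line in range(len(data)):
--         for col in range(len(data[0])):
--             if data[line][col] == symbol:
--                 positions.append([col, line])
--     return positions
--
-- def get_antinodes(antenna_positions):
--     positions = []
--     nb_antenna = len(antenna_positions)
--     for i in range(nb_antenna - 1):
--         antenna1 = antenna_positions[i]
--         for j in range(i + 1, nb_antenna):
--             antenna2 = antenna_positions[j]
--             positions.append([2 * antenna1[0] - antenna2[0], 2 * antenna1[1] - antenna2[1]])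
--             positions.append([2 * antenna2[0] - antenna1[0], 2 * antenna2[1] - antenna1[1]])
--     return positions
--
-- def get_all_antinodes(data):
--     antinodes = []
--     for symbol in '0123456789abcdefghijklmnopqrstuvwxyzABCDEFGHIJKLMNOPQRSTUVWXYZ':
--         antennas = get_antenna_positions(data, symbol)
--         antinodes += get_antinodes(antennas)
--         height, width = len(data), len(data[0])
--     return [
--         antinode for antinode in antinodes
--         if (antinode[0] >= 0) & (antinode[0] < width) & (antinode[1] >= 0) & (antinode[1] < height)
--     ]
-- ===== SOURCE B (Python) =====
-- SYMBOLS = '0123456789abcdefghijklmnopqrstuvwxyzABCDEFGHIJKLMNOPQRSTUVWXYZ'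
--
-- def get_all_antinodes(data):
--     height, width = len(data), len(data[0])
--     # one pass over the grid: every antenna as (symbol, position);
--     # data[y][x] raises IndexError on ragged grids, just as A does
--     cells = [(data[y][x], (x, y))
--              for y in range(height)
--              for x in range(width)
--              if data[y][x] in SYMBOLS]
--     groups = {}
--     for c, p in cells:
--         groups.setdefault(c, []).append(p)
--     out = []
--     for s in SYMBOLS:
--         rest = groups.get(s, [])
--         while rest:
--             (x1, y1), rest = rest[0], rest[1:]
--             for x2, y2 in rest:
--                 for ax, ay in ((2 * x1 - x2, 2 * y1 - y2), (2 * x2 - x1, 2 * y2 - y1)):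
--                     if 0 <= ax < width and 0 <= ay < height:
--                         out.append([ax, ay])
--     return out
-- ===== Notes on version B (the rewrite author's own statement) =====
-- stated objective: faster
-- what changed: B scans the grid once, grouping antenna positions by symbol into a dict, instead of A's 62 full-grid scans (one per symbol); pairs are generated per group with the bounds filter applied inline; intended as faster (measured 1.82x at n=1024, the largest size both finished).
import Mathlib
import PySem

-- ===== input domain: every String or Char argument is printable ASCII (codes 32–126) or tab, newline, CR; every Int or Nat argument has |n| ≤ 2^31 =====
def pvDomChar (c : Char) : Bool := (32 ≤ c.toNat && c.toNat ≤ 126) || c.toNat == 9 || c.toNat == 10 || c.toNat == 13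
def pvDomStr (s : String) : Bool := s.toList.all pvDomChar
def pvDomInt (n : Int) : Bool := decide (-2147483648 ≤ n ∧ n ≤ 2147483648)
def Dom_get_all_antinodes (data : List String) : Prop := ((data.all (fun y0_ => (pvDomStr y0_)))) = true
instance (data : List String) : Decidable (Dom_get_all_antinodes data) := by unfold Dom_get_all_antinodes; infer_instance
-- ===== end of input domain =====

-- B scans the grid once, grouping antenna positions by symbol into a dict, instead of A's
-- 62 full-grid scans (one per symbol), and applies the bounds filter while generating pairs
-- instead of in a final pass; intended as faster (measured 1.82x at the largest size both finished).

-- ===== PORT A =====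
def pvSymbols : List Char :=
  "0123456789abcdefghijklmnopqrstuvwxyzABCDEFGHIJKLMNOPQRSTUVWXYZ".toList

-- for line in range(len(data)): for col in range(len(data[0])): if data[line][col] == symbol: append [col, line]
def get_antenna_positions (data : List String) (symbol : Char) : List (List Int) :=
  (List.range data.length).foldl (fun positions line =>
    (List.range (data.headD "").toList.length).foldl (fun positions col =>
      if (data.getD line "").toList.getD col ' ' == symbol then
        positions ++ [[(col : Int), (line : Int)]]
      else positions) positions) []

-- for i in range(n-1): for j in range(i+1, n): append both antinodes
def get_antinodes (ap : List (List Int)) : List (List Int) :=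
  (List.range (ap.length - 1)).foldl (fun positions i =>
    (List.range' (i + 1) (ap.length - (i + 1))).foldl (fun positions j =>
      positions
        ++ [[2 * (ap.getD i []).getD 0 0 - (ap.getD j []).getD 0 0,
             2 * (ap.getD i []).getD 1 0 - (ap.getD j []).getD 1 0]]
        ++ [[2 * (ap.getD j []).getD 0 0 - (ap.getD i []).getD 0 0,
             2 * (ap.getD j []).getD 1 0 - (ap.getD i []).getD 1 0]]) positions) []

def get_all_antinodes (data : List String) : List (List Int) :=
  let antinodes := pvSymbols.foldl
    (fun antinodes symbol => antinodes ++ get_antinodes (get_antenna_positions data symbol)) []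
  let height : Int := data.length
  let width : Int := (data.headD "").toList.length
  antinodes.filter (fun an =>
    decide (an.getD 0 0 ≥ 0) && decide (an.getD 0 0 < width)
      && decide (an.getD 1 0 ≥ 0) && decide (an.getD 1 0 < height))

-- ===== PORT B =====
-- the comprehension: [(data[y][x], (x, y)) for y in range(height) for x in range(width)
--                     if data[y][x] in SYMBOLS]
-- indexing data[y][x] is rendered via enumerate of the row's first `width` chars; this is
-- exact whenever every row has at least `width` chars, i.e. on all inputs admitted by Pre_.
def pvCells (data : List String) (width : Nat) : List (Char × (Int × Int)) :=
  (PySem.List.enumerate data).flatMap (fun yr =>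
    (PySem.List.enumerate (yr.2.toList.take width)).filterMap (fun xc =>
      if pvSymbols.contains xc.2 then some (xc.2, (xc.1, yr.1)) else none))

-- the while-loop over rest = groups.get(s, []), filtering bounds while appending
def pvPairs (width height : Int) : List (Int × Int) → List (List Int) → List (List Int)
  | [], out => out
  | (x1, y1) :: rest, out =>
    pvPairs width height rest
      (rest.foldl (fun out q =>
        [(2 * x1 - q.1, 2 * y1 - q.2), (2 * q.1 - x1, 2 * q.2 - y1)].foldl
          (fun out c =>
            if 0 ≤ c.1 ∧ c.1 < width ∧ 0 ≤ c.2 ∧ c.2 < height then out ++ [[c.1, c.2]]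
            else out) out) out)

def get_all_antinodes_alt (data : List String) : List (List Int) :=
  let heightN : Nat := data.length
  let widthN : Nat := (data.headD "").toList.length
  let cells := pvCells data widthN
  let groups : PySem.Dict Char (List (Int × Int)) :=
    cells.foldl (fun g p => g.modify p.1 [] (fun l => l ++ [p.2])) ∅
  pvSymbols.foldl (fun out s =>
    pvPairs (widthN : Int) (heightN : Int) (groups.getD s []) out) []

-- ===== PRECONDITION & SPEC =====
-- Pre_ excludes exactly the inputs where A raises IndexError: empty data (data[0]) and
-- grids with a row shorter than the first row (data[line][col]); B raises there too.
def Pre_get_all_antinodes (data : List String) : Prop :=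
  data ≠ [] ∧ ∀ r ∈ data, (data.headD "").toList.length ≤ r.toList.length
instance (data : List String) : Decidable (Pre_get_all_antinodes data) := by
  unfold Pre_get_all_antinodes; infer_instance

def pvWitness_get_all_antinodes : List String := ["a0", ".a"]

def Spec_get_all_antinodes (data : List String) (out : List (List Int)) : Prop :=
  out = get_all_antinodes_alt data
instance (data : List String) (out : List (List Int)) : Decidable (Spec_get_all_antinodes data out) := by
  unfold Spec_get_all_antinodes; infer_instance

-- ===== CLAIM (what is proved, stated in full; the proofs are below) =====
def Claim_equal_get_all_antinodes : Prop := ∀ (data : List String),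
  Dom_get_all_antinodes data → Pre_get_all_antinodes data →
    Spec_get_all_antinodes data (get_all_antinodes data)

-- ===== LEMMAS AND PROOFS =====

-- a Python loop 'for j in range(s, s+n): use j and xs[j]' is a fold over the indexed slice
theorem pv_foldl_range'_index {α β : Type} (data : List α) (d : α) (g : β → Nat → α → β) :
    ∀ (n s : Nat) (init : β), s + n ≤ data.length →
      (List.range' s n).foldl (fun acc j => g acc j (data.getD j d)) init
        = (((data.drop s).take n).zipIdx s).foldl (fun acc p => g acc p.2 p.1) init := by
  intro n
  induction n with
  | zero => intro s init h; simp
  | succ m ih =>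
    intro s init h
    have hs : s < data.length := by omega
    rw [List.range'_succ, ← List.getElem_cons_drop hs]
    simp only [List.take_succ_cons, List.zipIdx_cons, List.foldl_cons]
    rw [List.getD_eq_getElem data d hs, ih (s + 1) _ (by omega)]

-- a fold over zipIdx that ignores the index is a fold over the list
theorem pv_foldl_zipIdx_fst {α β : Type} (g : β → α → β) :
    ∀ (xs : List α) (k : Nat) (init : β),
      (xs.zipIdx k).foldl (fun acc p => g acc p.1) init = xs.foldl g init := by
  intro xs
  induction xs with
  | nil => intro k init; rfl
  | cons x t ih => intro k init; simp only [List.zipIdx_cons, List.foldl_cons]; exact ih _ _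

-- a fold whose body appends a block is an append of a flatMap
theorem pv_foldl_eq_flatMap {α δ : Type} (g : List δ → α → List δ) (m : α → List δ) :
    ∀ (l : List α), (∀ acc x, x ∈ l → g acc x = acc ++ m x) →
      ∀ (acc : List δ), l.foldl g acc = acc ++ l.flatMap m := by
  intro l
  induction l with
  | nil => intro _ acc; simp
  | cons x t ih =>
    intro h acc
    simp only [List.foldl_cons, List.flatMap_cons, h acc x (by simp)]
    rw [ih (fun a y hy => h a y (by simp [hy]))]
    simp [List.append_assoc]

theorem pv_flatMap_congr {α δ : Type} {l : List α} {f g : α → List δ}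
    (h : ∀ x ∈ l, f x = g x) : l.flatMap f = l.flatMap g := by
  induction l with
  | nil => rfl
  | cons x t ih =>
    simp only [List.flatMap_cons, h x (by simp)]
    rw [ih (fun y hy => h y (by simp [hy]))]

-- canonical "all ordered pairs" list
def pvPairsA {γ δ : Type} (F : γ → γ → List δ) : List γ → List δ
  | [] => []
  | a :: rest => rest.flatMap (F a) ++ pvPairsA F rest

def pvMkA (a b : List Int) : List (List Int) :=
  [[2 * a.getD 0 0 - b.getD 0 0, 2 * a.getD 1 0 - b.getD 1 0],
   [2 * b.getD 0 0 - a.getD 0 0, 2 * b.getD 1 0 - a.getD 1 0]]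

theorem pv_triangle {γ δ : Type} (F : γ → γ → List δ) :
    ∀ (ap : List γ) (k : Nat) (full : List γ), full.drop k = ap →
      ((ap.take (ap.length - 1)).zipIdx k).flatMap
          (fun p => (full.drop (p.2 + 1)).flatMap (F p.1))
        = pvPairsA F ap := by
  intro ap
  induction ap with
  | nil => intro k full h; simp [pvPairsA]
  | cons a rest ih =>
    intro k full h
    have hfull : full.drop (k + 1) = rest := by
      have h1 : List.drop 1 (List.drop k full) = List.drop (k + 1) full := List.drop_drop
      rw [← h1, h]; rfl
    cases rest with
    | nil => simp [pvPairsA]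
    | cons b t =>
      simp only [pvPairsA, List.length_cons, Nat.add_sub_cancel, List.take_succ_cons,
        List.zipIdx_cons, List.flatMap_cons]
      rw [hfull]
      have ih' := ih (k + 1) full hfull
      simp only [List.length_cons, Nat.add_sub_cancel] at ih'
      rw [ih']
      simp [pvPairsA, List.append_assoc]

theorem pv_get_antinodes_eq (ap : List (List Int)) :
    get_antinodes ap = pvPairsA pvMkA ap := by
  unfold get_antinodes
  rw [List.range_eq_range']
  rw [pv_foldl_range'_index ap []
    (fun positions i a1 =>
      (List.range' (i + 1) (ap.length - (i + 1))).foldl (fun positions j =>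
        positions
          ++ [[2 * a1.getD 0 0 - (ap.getD j []).getD 0 0,
               2 * a1.getD 1 0 - (ap.getD j []).getD 1 0]]
          ++ [[2 * (ap.getD j []).getD 0 0 - a1.getD 0 0,
               2 * (ap.getD j []).getD 1 0 - a1.getD 1 0]]) positions)
    (ap.length - 1) 0 [] (by omega)]
  rw [List.drop_zero]
  rw [pv_foldl_eq_flatMap _
    (fun p => (ap.drop (p.2 + 1)).flatMap (pvMkA p.1)) _ ?hbody]
  case hbody =>
    intro acc p _
    by_cases hp : p.2 + 1 ≤ ap.length
    · rw [pv_foldl_range'_index ap []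
        (fun positions j a2 =>
          positions
            ++ [[2 * p.1.getD 0 0 - a2.getD 0 0, 2 * p.1.getD 1 0 - a2.getD 1 0]]
            ++ [[2 * a2.getD 0 0 - p.1.getD 0 0, 2 * a2.getD 1 0 - p.1.getD 1 0]])
        (ap.length - (p.2 + 1)) (p.2 + 1) acc (by omega)]
      rw [List.take_of_length_le (by simp)]
      rw [pv_foldl_zipIdx_fst
        (fun (positions : List (List Int)) (a2 : List Int) =>
          positions
            ++ [[2 * p.1.getD 0 0 - a2.getD 0 0, 2 * p.1.getD 1 0 - a2.getD 1 0]]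
            ++ [[2 * a2.getD 0 0 - p.1.getD 0 0, 2 * a2.getD 1 0 - p.1.getD 1 0]])]
      rw [pv_foldl_eq_flatMap _ (pvMkA p.1) _ (fun acc x _ => by simp [pvMkA])]
    · have h1 : ap.length - (p.2 + 1) = 0 := by omega
      have h2 : ap.drop (p.2 + 1) = [] := List.drop_eq_nil_of_le (by omega)
      simp [h1, h2]
  rw [List.nil_append]
  exact pv_triangle pvMkA ap 0 ap rfl

-- the bounds predicate of A's final filter
def pvPredA (w h : Int) (an : List Int) : Bool :=
  decide (an.getD 0 0 ≥ 0) && decide (an.getD 0 0 < w)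
    && decide (an.getD 1 0 ≥ 0) && decide (an.getD 1 0 < h)

theorem pvPredA_pair (w h a b : Int) :
    pvPredA w h [a, b] = decide (0 ≤ a ∧ a < w ∧ 0 ≤ b ∧ b < h) := by
  by_cases h1 : 0 ≤ a <;> by_cases h2 : a < w <;> by_cases h3 : 0 ≤ b <;> by_cases h4 : b < h <;>
    simp [pvPredA, ge_iff_le, h1, h2, h3, h4]

-- one pair of antennas: A's two candidates filtered at the end = B's inner conditional appends
theorem pv_pair_filter (w h : Int) (p q : Int × Int) :
    (pvMkA [p.1, p.2] [q.1, q.2]).filter (pvPredA w h)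
      = [(2 * p.1 - q.1, 2 * p.2 - q.2), (2 * q.1 - p.1, 2 * q.2 - p.2)].foldl
          (fun out c =>
            if 0 ≤ c.1 ∧ c.1 < w ∧ 0 ≤ c.2 ∧ c.2 < h then out ++ [[c.1, c.2]] else out) [] := by
  simp only [pvMkA, List.getD_cons_zero, List.getD_cons_succ, List.filter_cons,
    List.filter_nil, List.foldl_cons, List.foldl_nil, pvPredA_pair, decide_eq_true_eq]
  split_ifs <;> rfl

theorem pv_inner2_out (w h : Int) (q : Int × Int) (x1 y1 : Int) (out : List (List Int)) :
    ([(2 * x1 - q.1, 2 * y1 - q.2), (2 * q.1 - x1, 2 * q.2 - y1)].foldl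
        (fun out c =>
          if 0 ≤ c.1 ∧ c.1 < w ∧ 0 ≤ c.2 ∧ c.2 < h then out ++ [[c.1, c.2]] else out) out)
      = out ++ ([(2 * x1 - q.1, 2 * y1 - q.2), (2 * q.1 - x1, 2 * q.2 - y1)].foldl
        (fun out c =>
          if 0 ≤ c.1 ∧ c.1 < w ∧ 0 ≤ c.2 ∧ c.2 < h then out ++ [[c.1, c.2]] else out) []) := by
  simp only [List.foldl_cons, List.foldl_nil]
  split_ifs <;> try first | rfl | simp

theorem pv_pvPairs_out (w h : Int) :
    ∀ (ps : List (Int × Int)) (out : List (List Int)),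
      pvPairs w h ps out = out ++ pvPairs w h ps [] := by
  intro ps
  induction ps with
  | nil => intro out; simp [pvPairs]
  | cons p t ih =>
    intro out
    obtain ⟨x1, y1⟩ := p
    simp only [pvPairs]
    rw [pv_foldl_eq_flatMap _ _ t (fun acc q _ => pv_inner2_out w h q x1 y1 acc) out,
      pv_foldl_eq_flatMap _ _ t (fun acc q _ => pv_inner2_out w h q x1 y1 acc) [],
      ih (out ++ _), ih ([] ++ _)]
    simp


-- B's outer fold over the symbols is an append of a flatMap
theorem pv_foldl_pvPairs (w h : Int) (f : Char → List (Int × Int)) :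
    ∀ (l : List Char) (init : List (List Int)),
      l.foldl (fun out s => pvPairs w h (f s) out) init
        = init ++ l.flatMap (fun s => pvPairs w h (f s) []) := by
  intro l
  induction l with
  | nil => intro init; simp
  | cons s t ih =>
    intro init
    simp only [List.foldl_cons, List.flatMap_cons]
    rw [pv_pvPairs_out w h (f s) init, ih]
    simp [List.append_assoc]

-- per symbol: A's pair generation then bounds filter = B's filtered pair generation
theorem pv_pairs_filter (w h : Int) :
    ∀ ps : List (Int × Int),
      (pvPairsA pvMkA (ps.map (fun q => ([q.1, q.2] : List Int)))).filter (pvPredA w h)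
        = pvPairs w h ps [] := by
  intro ps
  induction ps with
  | nil => rfl
  | cons p t ih =>
    simp only [List.map_cons, pvPairsA, List.filter_append, pvPairs]
    rw [pv_foldl_eq_flatMap _
      (fun q => [(2 * p.1 - q.1, 2 * p.2 - q.2), (2 * q.1 - p.1, 2 * q.2 - p.2)].foldl
        (fun out c =>
          if 0 ≤ c.1 ∧ c.1 < w ∧ 0 ≤ c.2 ∧ c.2 < h then out ++ [[c.1, c.2]] else out) [])
      t (fun acc q _ => pv_inner2_out w h q p.1 p.2 acc) []]
    rw [pv_pvPairs_out w h t, List.nil_append, List.filter_flatMap, List.flatMap_map]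
    congr 1
    exact pv_flatMap_congr (fun q _ => pv_pair_filter w h p q)

-- one row: A's scan of row for symbol s = B's cells of the row, filtered to s
theorem pv_row (s : Char) (hs : s ∈ pvSymbols) (y : Int) :
    ∀ (l : List Char) (k : Nat),
      ((l.zipIdx k).filter (fun xc => xc.1 == s)).map
          (fun xc => ([(xc.2 : Int), y] : List Int))
        = (((PySem.List.enumerate l (k : Int)).filterMap (fun xc =>
              if pvSymbols.contains xc.2 then some (xc.2, (xc.1, y)) else none)).filter
            (fun p => p.1 == s)).map (fun p => ([p.2.1, p.2.2] : List Int)) := by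
  intro l
  induction l with
  | nil => intro k; rfl
  | cons c t ih =>
    intro k
    have hcast : ((k : Int) + 1) = ((k + 1 : Nat) : Int) := by push_cast; ring
    simp only [List.zipIdx_cons, PySem.List.enumerate_cons]
    rw [hcast]
    by_cases hc : c == s
    · have hceq : c = s := by simpa using hc
      have hm : c ∈ pvSymbols := by rw [hceq]; exact hs
      simp [hm, hc, ih (k + 1)]
    · by_cases hm : c ∈ pvSymbols
      · simp [hm, hc, ih (k + 1)]
      · simp [hm, hc, ih (k + 1)]

-- all rows
theorem pv_rows (w : Nat) (s : Char) (hs : s ∈ pvSymbols) :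
    ∀ (rows : List String) (k : Nat),
      (rows.zipIdx k).flatMap (fun rl =>
          (((rl.1.toList.take w).zipIdx 0).filter (fun xc => xc.1 == s)).map
            (fun xc => ([(xc.2 : Int), (rl.2 : Int)] : List Int)))
        = (PySem.List.enumerate rows (k : Int)).flatMap (fun yr =>
            ((((PySem.List.enumerate (yr.2.toList.take w)).filterMap (fun xc =>
                  if pvSymbols.contains xc.2 then some (xc.2, (xc.1, yr.1)) else none)).filter
                (fun p => p.1 == s)).map (fun p => ([p.2.1, p.2.2] : List Int)))) := by
  intro rows
  induction rows with
  | nil => intro k; rfl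
  | cons r t ih =>
    intro k
    have hcast : ((k : Int) + 1) = ((k + 1 : Nat) : Int) := by push_cast; ring
    simp only [List.zipIdx_cons, PySem.List.enumerate_cons, List.flatMap_cons]
    rw [pv_row s hs (k : Int) (r.toList.take w) 0, hcast, ih (k + 1)]
    simp

-- A's per-symbol grid scan = B's cells filtered to that symbol
theorem pv_gap_eq (data : List String) (s : Char) (hs : s ∈ pvSymbols)
    (hpre : ∀ r ∈ data, (data.headD "").toList.length ≤ r.toList.length) :
    get_antenna_positions data s
      = ((pvCells data ((data.headD "").toList.length)).filter (fun p => p.1 == s)).map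
          (fun p => ([p.2.1, p.2.2] : List Int)) := by
  unfold get_antenna_positions
  simp only [List.range_eq_range']
  rw [pv_foldl_range'_index data ""
    (fun positions line row =>
      (List.range' 0 ((data.headD "").toList.length)).foldl (fun positions col =>
        if row.toList.getD col ' ' == s then
          positions ++ [[(col : Int), (line : Int)]]
        else positions) positions)
    data.length 0 [] (by omega)]
  rw [List.drop_zero, List.take_of_length_le (le_refl _)]
  rw [pv_foldl_eq_flatMap _
    (fun rl => (((rl.1.toList.take ((data.headD "").toList.length)).zipIdx 0).filter
        (fun xc => xc.1 == s)).map (fun xc => ([(xc.2 : Int), (rl.2 : Int)] : List Int)))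
    (data.zipIdx 0) ?hrow []]
  case hrow =>
    intro acc rl hrl
    have hrl1 : rl.1 ∈ data := by
      obtain ⟨-, hlt, hx⟩ := List.mem_zipIdx (x := rl.1) (i := rl.2) (by simpa using hrl)
      rw [hx]; exact List.getElem_mem _
    have hmem : (data.headD "").toList.length ≤ rl.1.toList.length := hpre rl.1 hrl1
    rw [pv_foldl_range'_index rl.1.toList ' '
      (fun positions col ch =>
        if ch == s then positions ++ [[(col : Int), (rl.2 : Int)]] else positions)
      ((data.headD "").toList.length) 0 acc (by omega)]
    rw [List.drop_zero]
    exact PySem.List.foldl_append_if (fun (xc : Char × Nat) => xc.1 == s)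
      (fun (xc : Char × Nat) => ([(xc.2 : Int), (rl.2 : Int)] : List Int)) _ acc
  rw [List.nil_append, pvCells, List.filter_flatMap, List.map_flatMap]
  have h0 := pv_rows ((data.headD "").toList.length) s hs data 0
  simpa using h0

-- ===== VERDICT (by name: the statement is the Claim_ definition above) =====
theorem get_all_antinodes_spec : Claim_equal_get_all_antinodes := by
  intro data _ hpre
  obtain ⟨hne, hall⟩ := hpre
  unfold Spec_get_all_antinodes
  simp only [get_all_antinodes, get_all_antinodes_alt]
  rw [pv_foldl_eq_flatMap _ (fun s => get_antinodes (get_antenna_positions data s)) pvSymbols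
    (fun acc x _ => rfl) []]
  rw [pv_foldl_pvPairs ((data.headD "").toList.length : Int) (data.length : Int)
    (fun s => (List.foldl (fun g p => g.modify p.1 [] (fun l => l ++ [p.2]))
        (∅ : PySem.Dict Char (List (Int × Int)))
        (pvCells data ((data.headD "").toList.length))).getD s []) pvSymbols []]
  rw [List.nil_append, List.nil_append, List.filter_flatMap]
  refine pv_flatMap_congr (fun s hs => ?_)
  rw [pv_get_antinodes_eq, pv_gap_eq data s hs hall]
  rw [PySem.Dict.getD_foldl_modify_append]
  have hempty : (∅ : PySem.Dict Char (List (Int × Int))).getD s [] = [] := rfl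
  rw [hempty, List.nil_append]
  have hmm : ((pvCells data ((data.headD "").toList.length)).filter (fun p => p.1 == s)).map
      (fun p => ([p.2.1, p.2.2] : List Int))
    = (((pvCells data ((data.headD "").toList.length)).filter (fun p => p.1 == s)).map
        (fun p => p.2)).map (fun q => ([q.1, q.2] : List Int)) := by
    rw [List.map_map]; rfl
  rw [hmm]
  exact pv_pairs_filter _ _ _
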